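-- pv_equiv track=rewrite | github.com/pypi-data/pypi-mirror-402 | packages/aisentry/aisentry-1.0.0.tar.gz/aisentry-1.0.0/src/aisentry/scorers/data_privacy_scorer.py | _score_gdpr_compliance_comprehensive
-- ===== SOURCE A (Python) =====
-- from typing import Any, Dict, List
--
-- def _score_gdpr_compliance_comprehensive(parsed_data: Dict[str, Any]) -> int:
--     """
--     Score comprehensive GDPR Compliance (0-100) - Evidence-Based
--
--     Uses AST-based function detection for GDPR rights.
--     More AST-focused than library-based (no specific GDPR libraries).
--
--     Scoring based on GDPR rights implementation:
--     - All 3 rights (access + deletion + portability): 100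
--     - 2 rights: 70
--     - 1 right: 40
--     - No evidence: 0
--     """
--     # GDPR compliance is more about endpoints/functions than libraries
--     # Check for actual function definitions implementing GDPR rights
--
--     function_defs = parsed_data.get('function_defs', [])
--     function_names = [f.lower() for f in function_defs]
--
--     # Right to Access - data export endpoints
--     export_patterns = ['export_data', 'download_data', 'get_user_data', 'data_export', 'export_user']
--     has_export = any(any(pattern in func for pattern in export_patterns) for func in function_names)
--
--     # Right to Deletion - deletion endpoints
--     deletion_patterns = ['delete_account', 'remove_user', 'delete_user', 'gdpr_delete', 'erase_data']
--     has_deletion = any(any(pattern in func for pattern in deletion_patterns) for func in function_names)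
--
--     # Right to Portability - data portability endpoints
--     portability_patterns = ['export_json', 'export_csv', 'data_portability', 'portable_data']
--     has_portability = any(any(pattern in func for pattern in portability_patterns) for func in function_names)
--
--     # Also check function calls (not just definitions)
--     function_calls = parsed_data.get('function_calls', [])
--     function_call_names = [f.lower() for f in function_calls]
--
--     # Check if they're calling these functions
--     has_export = has_export or any(any(pattern in func for pattern in export_patterns) for func in function_call_names)
--     has_deletion = has_deletion or any(any(pattern in func for pattern in deletion_patterns) for func in function_call_names)
--     has_portability = has_portability or any(any(pattern in func for pattern in portability_patterns) for func in function_call_names)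
--
--     # Score based on number of rights implemented
--     rights_count = sum([has_export, has_deletion, has_portability])
--
--     if rights_count >= 3:
--         return 100
--     elif rights_count == 2:
--         return 70
--     elif rights_count == 1:
--         return 40
--     else:
--         return 0
-- ===== SOURCE B (Python) =====
-- # Inverted matching: instead of scanning each name for each pattern, enumerate the
-- # name's substrings of the five pattern lengths and look each up in a hash table,
-- # OR-ing the matched right's bit into a mask; the score is a table lookup by mask.
--
-- _GDPR_PATTERN_RIGHT = {
--     'export_data': 1, 'download_data': 1, 'get_user_data': 1, 'data_export': 1, 'export_user': 1,
--     'delete_account': 2, 'remove_user': 2, 'delete_user': 2, 'gdpr_delete': 2, 'erase_data': 2,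
--     'export_json': 4, 'export_csv': 4, 'data_portability': 4, 'portable_data': 4,
-- }
-- _GDPR_PATTERN_LENGTHS = (10, 11, 13, 14, 16)  # the distinct pattern lengths
-- _SCORE_BY_MASK = (0, 40, 40, 70, 40, 70, 70, 100)  # score of mask = 40/70/100 by popcount
--
--
-- def _score_gdpr_compliance_comprehensive(parsed_data):
--     mask = 0
--     for key in ('function_defs', 'function_calls'):
--         for name in parsed_data.get(key, []):
--             name = name.lower()
--             for i in range(len(name)):
--                 for length in _GDPR_PATTERN_LENGTHS:
--                     mask |= _GDPR_PATTERN_RIGHT.get(name[i:i + length], 0)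
--     return _SCORE_BY_MASK[mask]
-- ===== Notes on version B (the rewrite author's own statement) =====
-- stated objective: alternative
-- what changed: Inverts the matching: instead of A's six per-category any-scans that search every name for each of 14 patterns, B slides over each lowercased name once, looks every substring of the five pattern lengths up in a precomputed pattern-to-bit hash table, ORs the hits into a rights bitmask, and reads the score from an 8-entry table indexed by the mask.
import Mathlib
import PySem

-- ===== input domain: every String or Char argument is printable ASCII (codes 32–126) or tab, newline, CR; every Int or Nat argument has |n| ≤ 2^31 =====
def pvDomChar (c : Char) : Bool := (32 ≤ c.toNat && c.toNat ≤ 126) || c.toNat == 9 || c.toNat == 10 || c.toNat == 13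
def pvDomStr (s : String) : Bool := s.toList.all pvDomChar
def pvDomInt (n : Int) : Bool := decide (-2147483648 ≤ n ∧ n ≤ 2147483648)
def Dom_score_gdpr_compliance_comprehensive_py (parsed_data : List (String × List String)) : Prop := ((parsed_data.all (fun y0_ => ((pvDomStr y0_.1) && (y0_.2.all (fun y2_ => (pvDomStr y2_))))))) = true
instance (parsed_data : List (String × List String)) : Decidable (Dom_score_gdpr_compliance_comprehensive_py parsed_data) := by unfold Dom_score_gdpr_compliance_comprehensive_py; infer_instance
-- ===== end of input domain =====

-- B inverts the matching: instead of searching every name for each of the 14 patterns, it looks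
-- each substring of the five pattern lengths up in a pattern→bit table, ORs the hits into a
-- rights bitmask, and reads the score off an 8-entry table (objective: alternative).

-- ===== PORT A =====
def score_gdpr_compliance_comprehensive_py (parsed_data : List (String × List String)) : Int :=
  let function_defs := PySem.Dict.getD (PySem.Dict.mk parsed_data) "function_defs" []
  let function_names := function_defs.map PySem.Str.lower
  let export_patterns : List String := ["export_data", "download_data", "get_user_data", "data_export", "export_user"]
  let has_export := function_names.any (fun func => export_patterns.any (fun pattern => PySem.Str.isIn pattern func))
  let deletion_patterns : List String := ["delete_account", "remove_user", "delete_user", "gdpr_delete", "erase_data"]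
  let has_deletion := function_names.any (fun func => deletion_patterns.any (fun pattern => PySem.Str.isIn pattern func))
  let portability_patterns : List String := ["export_json", "export_csv", "data_portability", "portable_data"]
  let has_portability := function_names.any (fun func => portability_patterns.any (fun pattern => PySem.Str.isIn pattern func))
  let function_calls := PySem.Dict.getD (PySem.Dict.mk parsed_data) "function_calls" []
  let function_call_names := function_calls.map PySem.Str.lower
  let has_export := has_export || function_call_names.any (fun func => export_patterns.any (fun pattern => PySem.Str.isIn pattern func))
  let has_deletion := has_deletion || function_call_names.any (fun func => deletion_patterns.any (fun pattern => PySem.Str.isIn pattern func))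
  let has_portability := has_portability || function_call_names.any (fun func => portability_patterns.any (fun pattern => PySem.Str.isIn pattern func))
  let rights_count : Int := (if has_export then 1 else 0) + (if has_deletion then 1 else 0) + (if has_portability then 1 else 0)
  if rights_count ≥ 3 then 100
  else if rights_count = 2 then 70
  else if rights_count = 1 then 40
  else 0

-- ===== PORT B =====
def pvGdprPatternRight : PySem.Dict String Int := PySem.Dict.mk
  [("export_data", 1), ("download_data", 1), ("get_user_data", 1), ("data_export", 1), ("export_user", 1),
   ("delete_account", 2), ("remove_user", 2), ("delete_user", 2), ("gdpr_delete", 2), ("erase_data", 2),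
   ("export_json", 4), ("export_csv", 4), ("data_portability", 4), ("portable_data", 4)]

def pvGdprPatternLengths : List Int := [10, 11, 13, 14, 16]  -- the distinct pattern lengths

def pvGdprScoreByMask : List Int := [0, 40, 40, 70, 40, 70, 70, 100]  -- score of mask = 40/70/100 by popcount

def score_gdpr_compliance_comprehensive_py_alt (parsed_data : List (String × List String)) : Int :=
  let mask : Int :=
    (["function_defs", "function_calls"] : List String).foldl
      (fun mask key =>
        (PySem.Dict.getD (PySem.Dict.mk parsed_data) key []).foldl
          (fun mask name0 =>
            let name := PySem.Str.lower name0
            (PySem.List.pyRange 0 (PySem.Str.len name) 1).foldl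
              (fun mask i =>
                pvGdprPatternLengths.foldl
                  (fun mask length =>
                    PySem.Int.bor mask (PySem.Dict.getD pvGdprPatternRight (PySem.Str.slice name (some i) (some (i + length))) 0))
                  mask)
              mask)
          mask)
      0
  -- mask always lies in 0..7, so Python's tuple indexing cannot raise
  PySem.List.pyGetD pvGdprScoreByMask mask 0

-- ===== PRECONDITION & SPEC =====
def Spec_score_gdpr_compliance_comprehensive_py (parsed_data : List (String × List String)) (out : Int) : Prop := out = score_gdpr_compliance_comprehensive_py_alt parsed_data
instance (parsed_data : List (String × List String)) (out : Int) : Decidable (Spec_score_gdpr_compliance_comprehensive_py parsed_data out) := by unfold Spec_score_gdpr_compliance_comprehensive_py; infer_instance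

-- ===== CLAIM (what is proved, stated in full; the proofs are below) =====
def Claim_equal_score_gdpr_compliance_comprehensive_py : Prop := ∀ (parsed_data : List (String × List String)), Dom_score_gdpr_compliance_comprehensive_py parsed_data → Spec_score_gdpr_compliance_comprehensive_py parsed_data (score_gdpr_compliance_comprehensive_py parsed_data)

-- ===== LEMMAS AND PROOFS =====

-- the mask encoding of the three rights bits
def pvEnc (e d p : Bool) : Int := (if e then 1 else 0) + (if d then 2 else 0) + (if p then 4 else 0)

def pvExpPats : List String := ["export_data", "download_data", "get_user_data", "data_export", "export_user"]
def pvDelPats : List String := ["delete_account", "remove_user", "delete_user", "gdpr_delete", "erase_data"]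
def pvPortPats : List String := ["export_json", "export_csv", "data_portability", "portable_data"]

def pvMatches (name : String) (pats : List String) : Bool := pats.any (fun pat => PySem.Str.isIn pat name)

theorem pv_getD_tbl (s : String) :
    PySem.Dict.getD pvGdprPatternRight s 0 =
      if s ∈ pvExpPats then 1 else if s ∈ pvDelPats then 2 else if s ∈ pvPortPats then 4 else 0 := by
  rcases eq_or_ne s "export_data" with rfl | h0
  · decide
  rcases eq_or_ne s "download_data" with rfl | h1
  · decide
  rcases eq_or_ne s "get_user_data" with rfl | h2
  · decide
  rcases eq_or_ne s "data_export" with rfl | h3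
  · decide
  rcases eq_or_ne s "export_user" with rfl | h4
  · decide
  rcases eq_or_ne s "delete_account" with rfl | h5
  · decide
  rcases eq_or_ne s "remove_user" with rfl | h6
  · decide
  rcases eq_or_ne s "delete_user" with rfl | h7
  · decide
  rcases eq_or_ne s "gdpr_delete" with rfl | h8
  · decide
  rcases eq_or_ne s "erase_data" with rfl | h9
  · decide
  rcases eq_or_ne s "export_json" with rfl | h10
  · decide
  rcases eq_or_ne s "export_csv" with rfl | h11
  · decide
  rcases eq_or_ne s "data_portability" with rfl | h12
  · decide
  rcases eq_or_ne s "portable_data" with rfl | h13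
  · decide
  have e0 : ("export_data" == s) = false := beq_false_of_ne (Ne.symm h0)
  have e1 : ("download_data" == s) = false := beq_false_of_ne (Ne.symm h1)
  have e2 : ("get_user_data" == s) = false := beq_false_of_ne (Ne.symm h2)
  have e3 : ("data_export" == s) = false := beq_false_of_ne (Ne.symm h3)
  have e4 : ("export_user" == s) = false := beq_false_of_ne (Ne.symm h4)
  have e5 : ("delete_account" == s) = false := beq_false_of_ne (Ne.symm h5)
  have e6 : ("remove_user" == s) = false := beq_false_of_ne (Ne.symm h6)
  have e7 : ("delete_user" == s) = false := beq_false_of_ne (Ne.symm h7)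
  have e8 : ("gdpr_delete" == s) = false := beq_false_of_ne (Ne.symm h8)
  have e9 : ("erase_data" == s) = false := beq_false_of_ne (Ne.symm h9)
  have e10 : ("export_json" == s) = false := beq_false_of_ne (Ne.symm h10)
  have e11 : ("export_csv" == s) = false := beq_false_of_ne (Ne.symm h11)
  have e12 : ("data_portability" == s) = false := beq_false_of_ne (Ne.symm h12)
  have e13 : ("portable_data" == s) = false := beq_false_of_ne (Ne.symm h13)
  simp [pvGdprPatternRight, pvExpPats, pvDelPats, pvPortPats, PySem.Dict.getD, PySem.Dict.get?, List.find?, e0, e1, e2, e3, e4, e5, e6, e7, e8, e9, e10, e11, e12, e13, h0, h1, h2, h3, h4, h5, h6, h7, h8, h9, h10, h11, h12, h13]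

theorem pv_getD_vals (s : String) :
    PySem.Dict.getD pvGdprPatternRight s 0 = 0 ∨ PySem.Dict.getD pvGdprPatternRight s 0 = 1 ∨
    PySem.Dict.getD pvGdprPatternRight s 0 = 2 ∨ PySem.Dict.getD pvGdprPatternRight s 0 = 4 := by
  rw [pv_getD_tbl]; split_ifs <;> simp

theorem pv_getD_eq_one_iff (s : String) : PySem.Dict.getD pvGdprPatternRight s 0 = 1 ↔ s ∈ pvExpPats := by
  rw [pv_getD_tbl]; split_ifs <;> simp_all

theorem pv_getD_eq_two_iff (s : String) : PySem.Dict.getD pvGdprPatternRight s 0 = 2 ↔ s ∈ pvDelPats := by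
  rw [pv_getD_tbl]; split_ifs with h1 h2 h3 <;> simp_all
  · fin_cases h1 <;> decide

theorem pv_getD_eq_four_iff (s : String) : PySem.Dict.getD pvGdprPatternRight s 0 = 4 ↔ s ∈ pvPortPats := by
  rw [pv_getD_tbl]; split_ifs with h1 h2 h3 <;> simp_all
  · fin_cases h1 <;> decide
  · fin_cases h2 <;> decide

theorem pv_bor_enc (e d p : Bool) (v : Int) (hv : v = 0 ∨ v = 1 ∨ v = 2 ∨ v = 4) :
    PySem.Int.bor (pvEnc e d p) v = pvEnc (e || (v == 1)) (d || (v == 2)) (p || (v == 4)) := by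
  rcases hv with rfl | rfl | rfl | rfl <;> cases e <;> cases d <;> cases p <;> decide

theorem pv_foldl_bor_enc (l : List Int) (h : ∀ v ∈ l, v = 0 ∨ v = 1 ∨ v = 2 ∨ v = 4) (e d p : Bool) :
    l.foldl PySem.Int.bor (pvEnc e d p)
      = pvEnc (e || l.any (· == (1 : Int))) (d || l.any (· == (2 : Int))) (p || l.any (· == (4 : Int))) := by
  induction l generalizing e d p with
  | nil => simp
  | cons v t ih =>
    simp only [List.foldl_cons, List.any_cons]
    rw [pv_bor_enc e d p v (h v (List.mem_cons_self ..)),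
        ih (fun w hw => h w (List.mem_cons_of_mem _ hw))]
    simp [Bool.or_assoc]

theorem pv_foldl_foldl_flatMap {α β : Type} (l1 : List α) (l2 : List β) (f : α → β → Int)
    (g : Int → Int → Int) (init : Int) :
    l1.foldl (fun acc a => l2.foldl (fun acc b => g acc (f a b)) acc) init
      = (l1.flatMap (fun a => l2.map (f a))).foldl g init := by
  induction l1 generalizing init with
  | nil => simp
  | cons a t ih =>
    simp only [List.foldl_cons, List.flatMap_cons, List.foldl_append, List.foldl_map]
    exact ih _

-- the contributions the two inner loops feed through the OR, as one flat list
def pvContribs (name : String) : List Int :=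
  (PySem.List.pyRange 0 (PySem.Str.len name) 1).flatMap (fun i =>
    pvGdprPatternLengths.map (fun length =>
      PySem.Dict.getD pvGdprPatternRight (PySem.Str.slice name (some i) (some (i + length))) 0))

theorem pv_exists_slice_iff (name : String) (pats : List String)
    (hp : ∀ pat ∈ pats, pat.toList ≠ [] ∧ ((pat.toList.length : Int) ∈ pvGdprPatternLengths)) :
    (∃ i ∈ PySem.List.pyRange 0 (PySem.Str.len name) 1, ∃ L ∈ pvGdprPatternLengths,
        PySem.Str.slice name (some i) (some (i + L)) ∈ pats)
      ↔ pvMatches name pats = true := by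
  constructor
  · rintro ⟨i, hi, L, hL, hmem⟩
    rw [PySem.List.mem_pyRange_one] at hi
    have hL0 : (0 : Int) ≤ L := by fin_cases hL <;> decide
    rw [pvMatches, List.any_eq_true]
    refine ⟨_, hmem, ?_⟩
    have : PySem.Chars.isIn (PySem.Str.slice name (some i) (some (i + L))).toList name.toList = true := by
      apply (PySem.Chars.exists_prefix_drop_iff_isIn _ _).mp
      refine ⟨i.toNat, ?_⟩
      rw [PySem.Str.toList_slice, PySem.Chars.slice_eq_listSlice,
          PySem.List.slice_toNat _ hi.1 (by omega)]
      exact List.take_prefix _ _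
    simpa using this
  · intro hm
    rw [pvMatches, List.any_eq_true] at hm
    obtain ⟨pat, hpat, hin⟩ := hm
    have hin' : PySem.Chars.isIn pat.toList name.toList = true := by simpa using hin
    obtain ⟨j, hpre⟩ := (PySem.Chars.exists_prefix_drop_iff_isIn _ _).mpr hin'
    have hne := (hp pat hpat).1
    have hjlt : j < name.toList.length := by
      rcases Nat.lt_or_ge j name.toList.length with hc | hc
      · exact hc
      · rw [List.drop_eq_nil_of_le hc, List.prefix_nil] at hpre
        exact absurd hpre hne
    refine ⟨(j : Int), ?_, (pat.toList.length : Int), (hp pat hpat).2, ?_⟩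
    · rw [PySem.List.mem_pyRange_one, PySem.Str.len_eq]
      constructor
      · positivity
      · exact_mod_cast hjlt
    · have hs : PySem.Str.slice name (some (j : Int)) (some ((j : Int) + (pat.toList.length : Int))) = pat := by
        rw [← String.toList_inj, PySem.Str.toList_slice, PySem.Chars.slice_eq_listSlice,
            PySem.List.slice_natCast_add]
        exact (List.prefix_iff_eq_take.mp hpre).symm
      rw [hs]
      exact hpat

theorem pv_inner_fold (name : String) (e d p : Bool) :
    (PySem.List.pyRange 0 (PySem.Str.len name) 1).foldl
        (fun mask i =>
          pvGdprPatternLengths.foldl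
            (fun mask length =>
              PySem.Int.bor mask (PySem.Dict.getD pvGdprPatternRight (PySem.Str.slice name (some i) (some (i + length))) 0))
            mask)
        (pvEnc e d p)
      = pvEnc (e || pvMatches name pvExpPats) (d || pvMatches name pvDelPats) (p || pvMatches name pvPortPats) := by
  rw [pv_foldl_foldl_flatMap, pv_foldl_bor_enc _ (by
        intro v hv
        simp only [List.mem_flatMap, List.mem_map] at hv
        obtain ⟨i, _, L, _, rfl⟩ := hv
        exact pv_getD_vals _)]
  have key : ∀ (pats : List String) (r : Int),
      (∀ s : String, PySem.Dict.getD pvGdprPatternRight s 0 = r ↔ s ∈ pats) →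
      (∀ pat ∈ pats, pat.toList ≠ [] ∧ ((pat.toList.length : Int) ∈ pvGdprPatternLengths)) →
      ((PySem.List.pyRange 0 (PySem.Str.len name) 1).flatMap (fun i =>
          pvGdprPatternLengths.map (fun length =>
            PySem.Dict.getD pvGdprPatternRight (PySem.Str.slice name (some i) (some (i + length))) 0))).any
        (· == r) = pvMatches name pats := by
    intro pats r hiff hlen
    rw [Bool.eq_iff_iff, List.any_eq_true, ← pv_exists_slice_iff name pats hlen]
    simp only [List.mem_flatMap, List.mem_map, beq_iff_eq]
    constructor
    · rintro ⟨v, ⟨i, hi, L, hL, rfl⟩, hv⟩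
      exact ⟨i, hi, L, hL, (hiff _).mp hv⟩
    · rintro ⟨i, hi, L, hL, hmem⟩
      exact ⟨_, ⟨i, hi, L, hL, rfl⟩, (hiff _).mpr hmem⟩
  rw [key pvExpPats 1 pv_getD_eq_one_iff (by decide),
      key pvDelPats 2 pv_getD_eq_two_iff (by decide),
      key pvPortPats 4 pv_getD_eq_four_iff (by decide)]

theorem pv_names_fold (names : List String) (e d p : Bool) :
    names.foldl
        (fun mask name0 =>
          (PySem.List.pyRange 0 (PySem.Str.len (PySem.Str.lower name0)) 1).foldl
            (fun mask i =>
              pvGdprPatternLengths.foldl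
                (fun mask length =>
                  PySem.Int.bor mask (PySem.Dict.getD pvGdprPatternRight (PySem.Str.slice (PySem.Str.lower name0) (some i) (some (i + length))) 0))
                mask)
            mask)
        (pvEnc e d p)
      = pvEnc (e || names.any (fun n => pvMatches (PySem.Str.lower n) pvExpPats))
              (d || names.any (fun n => pvMatches (PySem.Str.lower n) pvDelPats))
              (p || names.any (fun n => pvMatches (PySem.Str.lower n) pvPortPats)) := by
  induction names generalizing e d p with
  | nil => simp
  | cons n t ih =>
    simp only [List.foldl_cons, List.any_cons]
    rw [pv_inner_fold (PySem.Str.lower n) e d p, ih]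
    simp [Bool.or_assoc]

theorem pv_names_fold0 (names : List String) :
    names.foldl
        (fun mask name0 =>
          (PySem.List.pyRange 0 (PySem.Str.len (PySem.Str.lower name0)) 1).foldl
            (fun mask i =>
              pvGdprPatternLengths.foldl
                (fun mask length =>
                  PySem.Int.bor mask (PySem.Dict.getD pvGdprPatternRight (PySem.Str.slice (PySem.Str.lower name0) (some i) (some (i + length))) 0))
                mask)
            mask)
        (0 : Int)
      = pvEnc (names.any (fun n => pvMatches (PySem.Str.lower n) pvExpPats))
              (names.any (fun n => pvMatches (PySem.Str.lower n) pvDelPats))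
              (names.any (fun n => pvMatches (PySem.Str.lower n) pvPortPats)) := by
  have h := pv_names_fold names false false false
  rw [show pvEnc false false false = (0 : Int) from rfl] at h
  simpa using h

theorem pv_final_map (e d p : Bool) :
    (if ((if e then (1:Int) else 0) + (if d then 1 else 0) + (if p then 1 else 0)) ≥ 3 then (100:Int)
     else if ((if e then (1:Int) else 0) + (if d then 1 else 0) + (if p then 1 else 0)) = 2 then 70
     else if ((if e then (1:Int) else 0) + (if d then 1 else 0) + (if p then 1 else 0)) = 1 then 40
     else 0)
      = PySem.List.pyGetD pvGdprScoreByMask (pvEnc e d p) 0 := by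
  cases e <;> cases d <;> cases p <;> decide

theorem pv_core (parsed_data : List (String × List String)) :
    score_gdpr_compliance_comprehensive_py parsed_data
      = score_gdpr_compliance_comprehensive_py_alt parsed_data := by
  unfold score_gdpr_compliance_comprehensive_py score_gdpr_compliance_comprehensive_py_alt
  simp only [List.foldl_cons, List.foldl_nil]
  rw [pv_names_fold0, pv_names_fold, ← pv_final_map]
  simp only [pvMatches, pvExpPats, pvDelPats, pvPortPats, List.any_map, Function.comp_def]
  rfl

-- ===== VERDICT (by name: the statement is the Claim_ definition above) =====
theorem score_gdpr_compliance_comprehensive_py_spec : Claim_equal_score_gdpr_compliance_comprehensive_py := by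
  intro parsed_data _
  exact pv_core parsed_data
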